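-- pv_equiv track=rewrite | github.com/saflhsajkhbgr/Psite_prediction | pELMparse_T.py | get_sliding_values
-- ===== SOURCE A (Python) =====
-- psite_window = 3 # calculate a psite score for each position, taking into account the number of psites in += psite_window AAs around position
--
-- def get_sliding_values(positions, seq_len):
--     values = []
--     for i in range(seq_len):
--         window_start = i - psite_window + 1
--         window_stop = i + psite_window + 1
--         if window_start < 1:
--             window_start = 1
--         if window_stop > seq_len:
--             window_stop = seq_len
--         value = len([pos for pos in positions if pos >= window_start and pos <= window_stop])
--         values.append(value)
--     return values
-- ===== SOURCE B (Python) =====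
-- psite_window = 3
--
-- def get_sliding_values(positions, seq_len):
--     # prefix-sum (cumulative count) approach: count each relevant position once,
--     # then answer every window query in O(1)
--     cnt = {}
--     for pos in positions:
--         if 1 <= pos <= seq_len:
--             cnt[pos] = cnt.get(pos, 0) + 1
--     pref = [0]
--     total = 0
--     for k in range(1, seq_len + 1):
--         total += cnt.get(k, 0)
--         pref.append(total)
--     return [pref[min(i + psite_window + 1, seq_len)] - pref[max(i - psite_window + 1, 1) - 1]
--             for i in range(seq_len)]
-- ===== Notes on version B (the rewrite author's own statement) =====
-- stated objective: faster
-- what changed: replaced the per-position rescan of the whole positions list by a counter dict plus a prefix-sum array, so each window value is a difference of two prefix sums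
import Mathlib
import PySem

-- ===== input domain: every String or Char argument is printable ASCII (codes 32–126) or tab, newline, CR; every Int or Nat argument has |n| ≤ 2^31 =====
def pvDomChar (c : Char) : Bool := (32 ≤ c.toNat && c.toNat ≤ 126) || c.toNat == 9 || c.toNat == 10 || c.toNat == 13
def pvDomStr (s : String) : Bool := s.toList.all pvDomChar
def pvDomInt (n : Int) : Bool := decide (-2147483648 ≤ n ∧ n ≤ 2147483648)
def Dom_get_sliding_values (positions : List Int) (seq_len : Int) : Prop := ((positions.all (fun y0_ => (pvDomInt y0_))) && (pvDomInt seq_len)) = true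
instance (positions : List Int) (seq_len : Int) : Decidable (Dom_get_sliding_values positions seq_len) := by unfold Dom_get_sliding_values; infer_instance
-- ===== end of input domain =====

-- B replaces A's per-window rescan of `positions` by a counter dict plus a prefix-sum list.

-- ===== PORT A =====
-- ===== PORT B splits the ports block below =====

def get_sliding_values (positions : List Int) (seq_len : Int) : List Int :=
  (PySem.List.pyRange 0 seq_len 1).foldl (fun values i =>
    let window_start := i - 3 + 1
    let window_stop := i + 3 + 1
    let window_start := if window_start < 1 then 1 else window_start
    let window_stop := if window_stop > seq_len then seq_len else window_stop
    let value : Int := ((positions.filter (fun pos => pos ≥ window_start && pos ≤ window_stop)).length : Int)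
    values ++ [value]) []

-- ===== PORT B =====
def get_sliding_values_alt (positions : List Int) (seq_len : Int) : List Int :=
  let cnt : PySem.Dict Int Int := positions.foldl (fun cnt pos =>
    if 1 ≤ pos ∧ pos ≤ seq_len then cnt.insert pos (cnt.getD pos 0 + 1) else cnt) PySem.Dict.empty
  let step := (PySem.List.pyRange 1 (seq_len + 1) 1).foldl (fun (st : List Int × Int) k =>
    let total := st.2 + cnt.getD k 0
    (st.1 ++ [total], total)) ([0], 0)
  let pref := step.1
  (PySem.List.pyRange 0 seq_len 1).map (fun i =>
    PySem.List.pyGetD pref (min (i + 3 + 1) seq_len) 0 -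
    PySem.List.pyGetD pref (max (i - 3 + 1) 1 - 1) 0)


-- ===== PRECONDITION & SPEC =====
def Spec_get_sliding_values (positions : List Int) (seq_len : Int) (out : List Int) : Prop := out = get_sliding_values_alt positions seq_len
instance (positions : List Int) (seq_len : Int) (out : List Int) : Decidable (Spec_get_sliding_values positions seq_len out) := by unfold Spec_get_sliding_values; infer_instance

-- ===== CLAIM (what is proved, stated in full; the proofs are below) =====
def Claim_equal_get_sliding_values : Prop := ∀ (positions : List Int) (seq_len : Int), Dom_get_sliding_values positions seq_len → Spec_get_sliding_values positions seq_len (get_sliding_values positions seq_len)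

-- ===== LEMMAS AND PROOFS =====

def pvC (positions : List Int) (k : Int) : Int :=
  (positions.countP (fun p => decide (1 ≤ p ∧ p ≤ k)) : Int)

theorem pv_foldl_if_filter {α β : Type} (q : α → Prop) [DecidablePred q] (g : β → α → β)
    (l : List α) (d : β) :
    l.foldl (fun acc x => if q x then g acc x else acc) d = (l.filter (fun x => decide (q x))).foldl g d := by
  induction l generalizing d with
  | nil => rfl
  | cons x xs ih =>
    simp only [List.foldl_cons, List.filter_cons]
    by_cases h : q x <;> simp [h, ih]

theorem pv_window_count (positions : List Int) (a b : Int) (h1 : 1 ≤ a) (h2 : a - 1 ≤ b) :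
    pvC positions b - pvC positions (a - 1)
      = (positions.countP (fun p => p ≥ a && p ≤ b) : Int) := by
  induction positions with
  | nil => simp [pvC]
  | cons p ps ih =>
    simp only [pvC, List.countP_cons] at ih ⊢
    push_cast
    have hd : ((if decide (1 ≤ p ∧ p ≤ b) = true then (1 : Int) else 0)
        - (if decide (1 ≤ p ∧ p ≤ a - 1) = true then (1 : Int) else 0))
        = (if (p ≥ a && p ≤ b) = true then (1 : Int) else 0) := by
      simp only [← Bool.decide_and, decide_eq_true_eq]
      split_ifs <;> omega
    linarith [hd, ih]

theorem pv_count_eq (positions : List Int) (n k : Int) (h1 : 1 ≤ k) (h2 : k ≤ n) :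
    ((positions.filter (fun p => decide (1 ≤ p ∧ p ≤ n))).count k : Int)
      = pvC positions k - pvC positions (k - 1) := by
  rw [pv_window_count positions k k h1 (by omega)]
  rw [List.count_eq_countP, List.countP_filter]
  congr 1
  apply List.countP_congr
  intro p _
  by_cases h : p = k
  · subst h
    simp
    omega
  · simp [h]
    omega

theorem pv_cnt_getD (positions : List Int) (n k : Int) :
    ((positions.foldl (fun cnt pos =>
        if 1 ≤ pos ∧ pos ≤ n then cnt.insert pos (cnt.getD pos 0 + 1) else cnt)
        (PySem.Dict.empty : PySem.Dict Int Int)).getD k 0)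
      = ((positions.filter (fun p => decide (1 ≤ p ∧ p ≤ n))).count k : Int) := by
  have h := pv_foldl_if_filter (α := Int) (β := PySem.Dict Int Int)
    (fun pos => 1 ≤ pos ∧ pos ≤ n)
    (fun cnt pos => cnt.insert pos (cnt.getD pos 0 + 1)) positions PySem.Dict.empty
  rw [h, PySem.Dict.getD_foldl_insert_add_one]
  simp [PySem.Dict.empty, PySem.Dict.getD, PySem.Dict.get?]

theorem pv_pref_loop (positions : List Int) (n : Int) (m : Nat) (hm : (m : Int) ≤ n) :
    ((PySem.List.pyRange 1 ((m : Int) + 1) 1).foldl (fun (st : List Int × Int) k =>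
        (st.1 ++ [st.2 + ((positions.foldl (fun cnt pos =>
            if 1 ≤ pos ∧ pos ≤ n then cnt.insert pos (cnt.getD pos 0 + 1) else cnt)
            (PySem.Dict.empty : PySem.Dict Int Int)).getD k 0)],
         st.2 + ((positions.foldl (fun cnt pos =>
            if 1 ≤ pos ∧ pos ≤ n then cnt.insert pos (cnt.getD pos 0 + 1) else cnt)
            (PySem.Dict.empty : PySem.Dict Int Int)).getD k 0))) ([0], 0))
      = ((PySem.List.pyRange 0 ((m : Int) + 1) 1).map (fun k => pvC positions k), pvC positions m) := by
  induction m with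
  | zero =>
    have h1 : PySem.List.pyRange 1 1 1 = [] := PySem.List.pyRange_one_eq_nil (by omega)
    have h0 : PySem.List.pyRange 0 1 1 = [0] := by
      have := PySem.List.pyRange_one_singleton (a := (0 : Int)); simpa using this
    have hc0 : pvC positions 0 = 0 := by
      simp [pvC]
      intro p hp; omega
    simp only [Nat.cast_zero, zero_add, h1, h0, List.foldl_nil, List.map_cons, List.map_nil, hc0]
  | succ m ih =>
    have hm' : (m : Int) ≤ n := by push_cast at hm ⊢; omega
    have hcast : ((m + 1 : Nat) : Int) + 1 = ((m : Int) + 1) + 1 := by push_cast; ring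
    rw [hcast,
      PySem.List.pyRange_one_succ_right (a := (1 : Int)) (b := (m : Int) + 1) (by omega),
      List.foldl_append, ih hm',
      PySem.List.pyRange_one_succ_right (a := (0 : Int)) (b := (m : Int) + 1) (by omega)]
    simp only [List.foldl_cons, List.foldl_nil, List.map_append, List.map_cons, List.map_nil]
    rw [pv_cnt_getD positions n ((m : Int) + 1),
      pv_count_eq positions n ((m : Int) + 1) (by omega) (by push_cast at hm; omega)]
    have hsub : (m : Int) + 1 - 1 = (m : Int) := by ring
    rw [hsub]
    have hcast2 : ((m + 1 : Nat) : Int) = (m : Int) + 1 := by push_cast; ring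
    rw [hcast2]
    have hfin : pvC positions ((m : Int)) + (pvC positions ((m : Int) + 1) - pvC positions ((m : Int)))
        = pvC positions ((m : Int) + 1) := by ring
    rw [hfin]

-- ===== VERDICT (by name: the statement is the Claim_ definition above) =====
theorem get_sliding_values_spec : Claim_equal_get_sliding_values := by
  intro positions seq_len _
  unfold Spec_get_sliding_values
  simp only [get_sliding_values, get_sliding_values_alt]
  rw [PySem.List.foldl_append_singleton_eq_map, List.nil_append]
  by_cases hn : seq_len ≤ 0
  · rw [PySem.List.pyRange_one_eq_nil (by omega)]
    simp
  · obtain ⟨m, hm⟩ : ∃ m : Nat, (m : Int) = seq_len := ⟨seq_len.toNat, Int.toNat_of_nonneg (by omega)⟩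
    rw [← hm]
    rw [pv_pref_loop positions ((m : Int)) m (by omega)]
    apply List.map_congr_left
    intro i hi
    have hib := (PySem.List.mem_pyRange_one).1 hi
    have h0i : 0 ≤ i := hib.1
    have hin : i < (m : Int) := hib.2
    rw [PySem.List.pyGetD_map_pyRange_of_nonneg _ _ _ _ (by omega : (0:Int) ≤ min (i + 3 + 1) (m : Int)) (by omega),
        PySem.List.pyGetD_map_pyRange_of_nonneg _ _ _ _ (by omega : (0:Int) ≤ max (i - 3 + 1) 1 - 1) (by omega)]
    rw [pv_window_count positions (max (i - 3 + 1) 1) (min (i + 3 + 1) (m : Int)) (by omega) (by omega)]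
    rw [List.countP_eq_length_filter]
    congr 2
    apply List.filter_congr
    intro p _
    have h1 : (if i - 3 + 1 < 1 then (1 : Int) else i - 3 + 1) = max (i - 3 + 1) 1 := by omega
    have h2 : (if i + 3 + 1 > (m : Int) then (m : Int) else i + 3 + 1) = min (i + 3 + 1) (m : Int) := by omega
    rw [h1, h2]
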